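-- pv_equiv track=rewrite | github.com/Adam-226/crack-zip | crack_zip_multithreaded.py | generate_passwords
-- ===== SOURCE A (Python) =====
-- import itertools
-- import string
--
-- def generate_passwords(digit_length, start_pos=0, batch_size=500):
--     """生成指定位数的所有可能密码，按批次返回，支持从指定位置开始"""
--     batch = []
--     # 跳过到开始位置
--     password_iterator = itertools.product(string.digits, repeat=digit_length)
--
--     # 跳过已尝试的密码
--     for _ in range(start_pos):
--         try:
--             next(password_iterator)
--         except StopIteration:
--             return  # 没有更多密码了
--
--     # 生成剩余密码
--     for password in password_iterator:
--         password_str = ''.join(password)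
--         batch.append(password_str)
--
--         if len(batch) >= batch_size:
--             yield batch
--             batch = []
--
--     if batch:  # 处理剩余的密码
--         yield batch
-- ===== SOURCE B (Python) =====
-- import string
--
-- def generate_passwords(digit_length, start_pos=0, batch_size=500):
--     """Same batches as A, computed arithmetically: enumerate the integers from
--     max(start_pos, 0) to 10**digit_length; the zero-padded rendering of i is
--     str(total + i) without its leading '1'."""
--     total = 10 ** digit_length
--     batch = []
--     for i in range(max(start_pos, 0), total):
--         batch.append(str(total + i)[1:])
--         if len(batch) >= batch_size:
--             yield batch
--             batch = []
--     if batch: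
--         yield batch
-- ===== Notes on version B (the rewrite author's own statement) =====
-- stated objective: simpler
-- what changed: Replaces itertools.product plus a one-by-one next() skip loop with direct integer enumeration: iterate i from max(start_pos,0) to 10**digit_length and render each i digit by digit, so skipping is O(1) arithmetic instead of consuming start_pos tuples.
import Mathlib
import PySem

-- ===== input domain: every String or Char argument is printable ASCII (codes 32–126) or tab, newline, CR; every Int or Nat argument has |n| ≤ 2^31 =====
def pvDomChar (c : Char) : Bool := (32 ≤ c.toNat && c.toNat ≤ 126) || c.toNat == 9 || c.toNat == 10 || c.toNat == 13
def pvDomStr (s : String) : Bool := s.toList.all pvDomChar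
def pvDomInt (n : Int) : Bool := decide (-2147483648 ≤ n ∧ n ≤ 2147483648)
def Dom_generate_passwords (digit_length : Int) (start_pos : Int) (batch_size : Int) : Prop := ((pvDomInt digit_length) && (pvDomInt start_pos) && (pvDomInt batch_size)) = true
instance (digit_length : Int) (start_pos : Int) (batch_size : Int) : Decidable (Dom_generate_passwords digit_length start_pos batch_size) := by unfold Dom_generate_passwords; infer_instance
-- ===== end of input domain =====

-- B replaces itertools.product plus the one-by-one next() skip loop by integer enumeration
-- from max(start_pos, 0), rendering i as str(10**digit_length + i)[1:] (objective: simpler).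

-- ===== PORT A =====
-- string.digits
def pvDigits : List Char := ['0', '1', '2', '3', '4', '5', '6', '7', '8', '9']

-- itertools.product(string.digits, repeat=n): the tuples (as List Char) in product order
def pvProd : Nat → List (List Char)
  | 0 => [[]]
  | n + 1 => pvDigits.flatMap (fun c => (pvProd n).map (fun t => c :: t))

-- A's generation loop: append each password to batch, yield batch once len(batch) >= batch_size,
-- then 'if batch: yield batch'
def pvChunkA : List String → List String → Int → List (List String)
  | [], batch, _ => if batch.isEmpty then [] else [batch]
  | p :: rest, batch, bs =>
    if bs ≤ ((batch ++ [p]).length : Int) then (batch ++ [p]) :: pvChunkA rest [] bs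
    else pvChunkA rest (batch ++ [p]) bs

def generate_passwords (digit_length : Int) (start_pos : Int) (batch_size : Int) : List (List String) :=
  -- password_str = ''.join(password) for each product tuple
  let pws := (pvProd digit_length.toNat).map (fun t => String.ofList t)
  -- the skip loop calls next() start_pos times (range(start_pos) is empty for start_pos ≤ 0) and
  -- returns no batches if the iterator exhausts during the skip — exactly List.drop
  pvChunkA (pws.drop start_pos.toNat) [] batch_size

-- ===== PORT B =====
-- B's single loop 'for i in range(max(start_pos, 0), total)' with state (yielded batches, batch);
-- str(total + i)[1:] is PySem.Int.toChars with the slice [1:]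
def generate_passwords_alt (digit_length : Int) (start_pos : Int) (batch_size : Int) : List (List String) :=
  let total : Int := (10 : Int) ^ digit_length.toNat  -- total = 10 ** digit_length
  let st := (PySem.List.pyRange (max start_pos 0) total 1).foldl
    (fun (st : List (List String) × List String) i =>
      let s := String.ofList (PySem.List.slice (PySem.Int.toChars (total + i)) (some 1) none)
      let b := st.2 ++ [s]
      if batch_size ≤ (b.length : Int) then (st.1 ++ [b], []) else (st.1, b))
    ([], [])
  if st.2.isEmpty then st.1 else st.1 ++ [st.2]

-- ===== PRECONDITION & SPEC =====
-- Pre_ excludes negative digit_length, where A raises ValueError (itertools.product repeat < 0).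
def Pre_generate_passwords (digit_length : Int) (start_pos : Int) (batch_size : Int) : Prop :=
  0 ≤ digit_length
instance (digit_length : Int) (start_pos : Int) (batch_size : Int) : Decidable (Pre_generate_passwords digit_length start_pos batch_size) := by unfold Pre_generate_passwords; infer_instance

def pvWitness_generate_passwords : Int × Int × Int := (2, 3, 7)

def Spec_generate_passwords (digit_length : Int) (start_pos : Int) (batch_size : Int) (out : List (List String)) : Prop := out = generate_passwords_alt digit_length start_pos batch_size
instance (digit_length : Int) (start_pos : Int) (batch_size : Int) (out : List (List String)) : Decidable (Spec_generate_passwords digit_length start_pos batch_size out) := by unfold Spec_generate_passwords; infer_instance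

-- ===== CLAIM (what is proved, stated in full; the proofs are below) =====
def Claim_equal_generate_passwords : Prop := ∀ (digit_length : Int) (start_pos : Int) (batch_size : Int), Dom_generate_passwords digit_length start_pos batch_size → Pre_generate_passwords digit_length start_pos batch_size → Spec_generate_passwords digit_length start_pos batch_size (generate_passwords digit_length start_pos batch_size)

-- ===== LEMMAS AND PROOFS =====

-- proof-level digit renderer: the n low decimal digits of v, high to low, before s
def pvFmt : Nat → Int → List Char → List Char
  | 0, _, s => s
  | n + 1, v, s =>
    pvFmt n (PySem.Int.floordiv v 10) (PySem.List.pyGetD pvDigits (PySem.Int.mod v 10) ' ' :: s)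

-- pvFmt only prepends onto its accumulator
theorem pvFmt_acc (n : Nat) : ∀ (v : Int) (s : List Char), pvFmt n v s = pvFmt n v [] ++ s := by
  induction n with
  | zero => intro v s; rfl
  | succ n ih =>
    intro v s
    rw [pvFmt, pvFmt, ih _ (_ :: s), ih _ (_ :: ([] : List Char))]
    simp

-- one pvFmt step peels the low digit of q*10 + r
theorem pvFmt_step (n q r : Nat) (hr : r < 10) (s : List Char) :
    pvFmt (n + 1) ((q * 10 + r : Nat) : Int) s = pvFmt n (q : Int) (pvDigits.getD r ' ' :: s) := by
  rw [pvFmt]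
  rw [show PySem.Int.floordiv ((q * 10 + r : Nat) : Int) 10 = (q : Int) by
        rw [PySem.Int.floordiv_eq_ediv_of_pos (by norm_num)]; omega,
      show PySem.Int.mod ((q * 10 + r : Nat) : Int) 10 = ((r : Nat) : Int) by
        rw [PySem.Int.mod_eq_emod_of_pos (by norm_num)]; omega,
      PySem.List.pyGetD_natCast]

-- the product tuples can equally be built by appending the LAST digit
theorem pvProd_snoc (n : Nat) :
    pvProd (n + 1) = (pvProd n).flatMap (fun t => pvDigits.map (fun c => t ++ [c])) := by
  induction n with
  | zero => decide
  | succ n ih =>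
    conv_lhs => rw [show pvProd (n + 1 + 1) = pvDigits.flatMap (fun c => (pvProd (n + 1)).map (fun t => c :: t)) from rfl, ih]
    conv_rhs => rw [show pvProd (n + 1) = pvDigits.flatMap (fun c => (pvProd n).map (fun t => c :: t)) from rfl]
    simp [List.map_flatMap, List.flatMap_assoc, List.flatMap_map, List.map_map, Function.comp_def]

theorem pvRange_mul_flat (k : Nat) : ∀ m : Nat, List.range (m * k) =
    (List.range m).flatMap (fun q => (List.range k).map (fun r => q * k + r)) := by
  intro m
  induction m with
  | zero => simp
  | succ m ihm =>
    rw [Nat.succ_mul, List.range_add, ihm, List.range_succ, List.flatMap_append]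
    simp

theorem pvDigits_range : (List.range 10).map (fun r => pvDigits.getD r ' ') = pvDigits := by decide

-- the i-th product tuple is exactly the digit rendering of i
theorem pvProd_eq_fmt (n : Nat) :
    pvProd n = (List.range (10 ^ n)).map (fun i : Nat => pvFmt n (i : Int) []) := by
  induction n with
  | zero => rfl
  | succ n ih =>
    rw [pvProd_snoc, ih, pow_succ, pvRange_mul_flat, List.flatMap_map, List.map_flatMap]
    congr 1
    funext q
    rw [List.map_map]
    have h1 : ∀ r ∈ List.range 10,
        ((fun i : Nat => pvFmt (n + 1) (i : Int) []) ∘ fun r => q * 10 + r) r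
          = pvFmt n (q : Int) [] ++ [pvDigits.getD r ' '] := by
      intro r hr
      simp only [Function.comp]
      rw [pvFmt_step n q r (List.mem_range.mp hr), pvFmt_acc]
    rw [List.map_congr_left h1, show (fun r => pvFmt n (q : Int) [] ++ [pvDigits.getD r ' '])
        = (fun c => pvFmt n (q : Int) [] ++ [c]) ∘ (fun r => pvDigits.getD r ' ') from rfl,
      ← List.map_map, pvDigits_range]

theorem pvDigitChar (r : Nat) (hr : r < 10) : r.digitChar = pvDigits.getD r ' ' := by
  interval_cases r <;> rfl

-- str(10^n + i) spelt out: a leading '1' followed by the n-digit rendering of i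
theorem pvToDigitsCore_pad (n : Nat) : ∀ (fuel i : Nat) (ds : List Char), i < 10 ^ n → n + 1 ≤ fuel →
    Nat.toDigitsCore 10 fuel (10 ^ n + i) ds = '1' :: (pvFmt n (i : Int) [] ++ ds) := by
  induction n with
  | zero =>
    intro fuel i ds hi hf
    interval_cases i
    match fuel, hf with
    | f + 1, _ =>
      rw [Nat.toDigitsCore]
      simp only [pow_zero]
      exact if_pos rfl
  | succ n ih =>
    intro fuel i ds hi hf
    obtain ⟨f, rfl⟩ : ∃ f, fuel = f + 1 := ⟨fuel - 1, by omega⟩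
    have hp : 10 ^ (n + 1) = 10 * 10 ^ n := by ring
    have hmod : (10 ^ (n + 1) + i) % 10 = i % 10 := by omega
    have hdiv : (10 ^ (n + 1) + i) / 10 = 10 ^ n + i / 10 := by omega
    have hne : ¬ (10 ^ n + i / 10 = 0) := by positivity
    rw [Nat.toDigitsCore]
    simp only [hmod, hdiv, if_neg hne]
    rw [ih f (i / 10) _ (by omega) (by omega)]
    rw [show ((i : Nat) : Int) = ((i / 10 * 10 + i % 10 : Nat) : Int) by omega]
    rw [pvFmt_step n (i / 10) (i % 10) (by omega), pvFmt_acc]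
    rw [pvDigitChar (i % 10) (by omega)]
    rw [show pvFmt n ((i / 10 : Nat) : Int) [pvDigits.getD (i % 10) ' ']
        = pvFmt n ((i / 10 : Nat) : Int) [] ++ [pvDigits.getD (i % 10) ' '] from pvFmt_acc n _ _]
    simp

theorem pvToChars_pad (n i : Nat) (hi : i < 10 ^ n) :
    PySem.Int.toChars ((10 : Int) ^ n + (i : Int)) = '1' :: pvFmt n (i : Int) [] := by
  have h1 : (10 : Int) ^ n + (i : Int) = ((10 ^ n + i : Nat) : Int) := by push_cast; ring
  rw [h1, PySem.Int.toChars, if_neg (by omega), Int.toNat_natCast, Nat.toDigits]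
  rw [pvToDigitsCore_pad n _ i [] hi (by have := Nat.lt_pow_self (by norm_num : 1 < 10) (n := n); omega)]
  simp

-- B's fold is A's chunking recursion applied to the mapped index list
theorem pvFold_chunk (bs : Int) (f : Int → String) :
    ∀ (l : List Int) (out : List (List String)) (batch : List String),
      (let st := l.foldl (fun (st : List (List String) × List String) i =>
          if bs ≤ ((st.2 ++ [f i]).length : Int) then (st.1 ++ [st.2 ++ [f i]], []) else (st.1, st.2 ++ [f i])) (out, batch)
       if st.2.isEmpty then st.1 else st.1 ++ [st.2])
      = out ++ pvChunkA (l.map f) batch bs := by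
  intro l
  induction l with
  | nil =>
    intro out batch
    simp only [List.foldl_nil, List.map_nil, pvChunkA]
    by_cases h : batch.isEmpty <;> simp [h]
  | cons i l ih =>
    intro out batch
    simp only [List.foldl_cons, List.map_cons, pvChunkA]
    by_cases h : bs ≤ ((batch ++ [f i]).length : Int)
    · simp only [if_pos h, ih]; simp
    · simp only [if_neg h, ih]

theorem drop_range (N k : Nat) : (List.range N).drop k = (List.range (N - k)).map (k + ·) := by
  by_cases h : k ≤ N
  · conv_lhs => rw [show N = k + (N - k) by omega, List.range_add]
    simp
  · rw [List.drop_eq_nil_of_le (by simp; omega), Nat.sub_eq_zero_of_le (by omega)]; rfl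

theorem main_eq (d sp bs : Int) :
    generate_passwords d sp bs = generate_passwords_alt d sp bs := by
  simp only [generate_passwords, generate_passwords_alt]
  rw [pvFold_chunk bs (fun i => String.ofList (PySem.List.slice (PySem.Int.toChars ((10 : Int) ^ d.toNat + i)) (some 1) none))]
  rw [List.nil_append]
  congr 1
  rw [pvProd_eq_fmt, List.map_map, ← List.map_drop, drop_range, List.map_map,
      PySem.List.pyRange_one, List.map_map]
  have hcount : ((10 : Int) ^ d.toNat - max sp 0).toNat = 10 ^ d.toNat - sp.toNat := by
    have : (10 : Int) ^ d.toNat = ((10 ^ d.toNat : Nat) : Int) := by push_cast; ring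
    rw [this]; omega
  rw [hcount]
  apply List.map_congr_left
  intro j hj
  simp only [Function.comp]
  have hlt : sp.toNat + j < 10 ^ d.toNat := by
    have := List.mem_range.mp hj; omega
  rw [show max sp 0 + (j : Int) = ((sp.toNat + j : Nat) : Int) by push_cast; omega]
  rw [pvToChars_pad d.toNat (sp.toNat + j) hlt, PySem.List.slice_from_one]
  rfl

-- ===== VERDICT (by name: the statement is the Claim_ definition above) =====
theorem generate_passwords_spec : Claim_equal_generate_passwords := by
  intro digit_length start_pos batch_size _ _
  exact main_eq digit_length start_pos batch_size
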